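-- pv_equiv track=rewrite | github.com/Effectus2017/AesanAPI | Database/tools/compare_databases.py | compare_tables
-- ===== SOURCE A (Python) =====
-- def compare_tables(db1_tables, db2_tables):
--     """Compara las tablas entre dos bases de datos"""
--     db1_tables_set = set([(schema, table) for schema, table in db1_tables])
--     db2_tables_set = set([(schema, table) for schema, table in db2_tables])
--
--     only_in_db1 = db1_tables_set - db2_tables_set
--     only_in_db2 = db2_tables_set - db1_tables_set
--     common_tables = db1_tables_set.intersection(db2_tables_set)
--
--     return {
--         'only_in_db1': sorted(list(only_in_db1)),
--         'only_in_db2': sorted(list(only_in_db2)),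
--         'common': sorted(list(common_tables))
--     }
-- ===== SOURCE B (Python) =====
-- def compare_tables(db1_tables, db2_tables):
--     """Compara las tablas entre dos bases de datos"""
--     d1 = sorted(dict.fromkeys((schema, table) for schema, table in db1_tables))
--     d2 = sorted(dict.fromkeys((schema, table) for schema, table in db2_tables))
--     only_in_db1, only_in_db2, common = [], [], []
--     i, j = 0, 0
--     while i < len(d1) and j < len(d2):
--         if d1[i] < d2[j]:
--             only_in_db1.append(d1[i]); i += 1
--         elif d2[j] < d1[i]:
--             only_in_db2.append(d2[j]); j += 1
--         else:
--             common.append(d1[i]); i += 1; j += 1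
--     only_in_db1.extend(d1[i:])
--     only_in_db2.extend(d2[j:])
--     return {'only_in_db1': only_in_db1, 'only_in_db2': only_in_db2, 'common': common}
-- ===== Notes on version B (the rewrite author's own statement) =====
-- stated objective: alternative
-- what changed: Replaces A's hash-set difference/intersection plus three final sorts by a dedup-then-sort of each side followed by a single two-pointer merge that emits the three already-sorted buckets in one pass.
import Mathlib
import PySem

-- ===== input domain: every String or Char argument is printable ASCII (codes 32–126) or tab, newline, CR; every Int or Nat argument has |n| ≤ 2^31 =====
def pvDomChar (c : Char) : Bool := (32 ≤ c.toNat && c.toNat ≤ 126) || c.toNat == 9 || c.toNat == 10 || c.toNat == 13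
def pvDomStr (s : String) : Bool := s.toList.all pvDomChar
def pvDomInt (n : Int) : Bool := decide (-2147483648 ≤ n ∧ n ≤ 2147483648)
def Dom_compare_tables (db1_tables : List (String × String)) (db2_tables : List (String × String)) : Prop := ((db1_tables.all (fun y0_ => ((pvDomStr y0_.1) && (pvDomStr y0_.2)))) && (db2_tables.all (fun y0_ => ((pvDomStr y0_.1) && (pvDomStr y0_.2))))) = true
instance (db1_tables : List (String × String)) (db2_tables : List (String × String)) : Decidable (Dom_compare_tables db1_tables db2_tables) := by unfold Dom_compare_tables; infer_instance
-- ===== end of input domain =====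

-- B replaces A's hash-set difference/intersection plus three final sorts by dedup-then-sort of each
-- side followed by one two-pointer merge emitting the three sorted buckets (alternative decomposition).


-- ===== PORT A =====
-- sorted(list(s)) on 2-tuples: Python's lexicographic tuple order = PySem.List.sorted2 with the two projections
def compare_tables (db1_tables : List (String × String)) (db2_tables : List (String × String)) : List (String × List (String × String)) :=
  let db1_tables_set : PySem.Set (String × String) := PySem.Set.ofList (db1_tables.map (fun st => (st.1, st.2)))
  let db2_tables_set : PySem.Set (String × String) := PySem.Set.ofList (db2_tables.map (fun st => (st.1, st.2)))
  let only_in_db1 := PySem.Set.diff db1_tables_set db2_tables_set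
  let only_in_db2 := PySem.Set.diff db2_tables_set db1_tables_set
  let common_tables := PySem.Set.inter db1_tables_set db2_tables_set
  [("only_in_db1", PySem.List.sorted2 only_in_db1 Prod.fst Prod.snd),
   ("only_in_db2", PySem.List.sorted2 only_in_db2 Prod.fst Prod.snd),
   ("common", PySem.List.sorted2 common_tables Prod.fst Prod.snd)]

-- ===== PORT B =====
-- Python's '<' on 2-tuples of strings: first components, then (on equality) second components
def pvTupleLt (p q : String × String) : Bool :=
  decide (p.1 < q.1) || (decide (p.1 = q.1) && decide (p.2 < q.2))

-- the while loop of Source B: two-pointer merge of the two sorted deduplicated lists,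
-- including the two final extend(d1[i:]) / extend(d2[j:]) drains
def pvMerge : List (String × String) → List (String × String) →
    List (String × String) × List (String × String) × List (String × String)
  | [], d2 => ([], d2, [])
  | a :: t1, [] => (a :: t1, [], [])
  | a :: t1, b :: t2 =>
    if pvTupleLt a b then
      let r := pvMerge t1 (b :: t2); (a :: r.1, r.2.1, r.2.2)
    else if pvTupleLt b a then
      let r := pvMerge (a :: t1) t2; (r.1, b :: r.2.1, r.2.2)
    else
      let r := pvMerge t1 t2; (r.1, r.2.1, a :: r.2.2)
  termination_by d1 d2 => d1.length + d2.length

def compare_tables_alt (db1_tables : List (String × String)) (db2_tables : List (String × String)) : List (String × List (String × String)) :=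
  let d1 := PySem.List.sorted2 (PySem.List.dedup (db1_tables.map (fun st => (st.1, st.2)))) Prod.fst Prod.snd
  let d2 := PySem.List.sorted2 (PySem.List.dedup (db2_tables.map (fun st => (st.1, st.2)))) Prod.fst Prod.snd
  let r := pvMerge d1 d2
  [("only_in_db1", r.1), ("only_in_db2", r.2.1), ("common", r.2.2)]

-- ===== PRECONDITION & SPEC =====
def Spec_compare_tables (db1_tables : List (String × String)) (db2_tables : List (String × String)) (out : List (String × List (String × String))) : Prop := out = compare_tables_alt db1_tables db2_tables
instance (db1_tables : List (String × String)) (db2_tables : List (String × String)) (out : List (String × List (String × String))) : Decidable (Spec_compare_tables db1_tables db2_tables out) := by unfold Spec_compare_tables; infer_instance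

-- ===== CLAIM (what is proved, stated in full; the proofs are below) =====
def Claim_equal_compare_tables : Prop := ∀ (db1_tables : List (String × String)) (db2_tables : List (String × String)), Dom_compare_tables db1_tables db2_tables → Spec_compare_tables db1_tables db2_tables (compare_tables db1_tables db2_tables)

-- ===== LEMMAS AND PROOFS =====

-- the lexicographic (Python tuple) strict order, as a Prop via Mathlib's Lex (String × String)
def PvLt (a b : String × String) : Prop := (toLex a : Lex (String × String)) < toLex b

theorem pvTupleLt_eq_decide (a b : String × String) :
    pvTupleLt a b = decide ((toLex a : Lex (String × String)) < toLex b) := by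
  rcases lt_trichotomy a.1 b.1 with h | h | h
  · simp [pvTupleLt, Prod.Lex.lt_iff, h]
  · simp [pvTupleLt, Prod.Lex.lt_iff, h]
  · simp [pvTupleLt, Prod.Lex.lt_iff, lt_asymm h, h.ne']

theorem sorted2_eq_sorted_lex (xs : List (String × String)) :
    PySem.List.sorted2 xs Prod.fst Prod.snd =
      PySem.List.sorted xs (fun p => (toLex p : Lex (String × String))) := by
  rw [PySem.List.sorted_eq_foldl_insertBy]
  show xs.foldl (fun acc x => PySem.List.insertBy
      (fun a b => decide (a.1 < b.1) || (!decide (b.1 < a.1) && decide (a.2 < b.2))) x acc) [] = _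
  have hc : (fun (a b : String × String) => decide (a.1 < b.1) || (!decide (b.1 < a.1) && decide (a.2 < b.2)))
      = fun a b => decide ((toLex a : Lex (String × String)) < toLex b) := by
    funext a b
    rcases lt_trichotomy a.1 b.1 with h | h | h
    · simp [Prod.Lex.lt_iff, h]
    · simp [Prod.Lex.lt_iff, h]
    · simp [Prod.Lex.lt_iff, h, lt_asymm h, h.ne']
  rw [hc]

-- merge of two strictly increasing lists = (difference, anti-difference, intersection) as filters
theorem pvMerge_spec : ∀ (d1 d2 : List (String × String)),
    d1.Pairwise PvLt → d2.Pairwise PvLt →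
    pvMerge d1 d2 = (d1.filter (fun x => !d2.contains x),
                     d2.filter (fun x => !d1.contains x),
                     d1.filter (fun x => d2.contains x)) := by
  intro d1 d2
  induction d1, d2 using pvMerge.induct with
  | case1 d2 => intro _ _; simp [pvMerge]
  | case2 a t1 => intro _ _; simp [pvMerge]
  | case3 a t1 b t2 hlt ih =>
    intro h1 h2
    have hab : PvLt a b := show (toLex a : Lex (String × String)) < toLex b from
      of_decide_eq_true (pvTupleLt_eq_decide a b ▸ hlt)
    have h1' := List.pairwise_cons.mp h1
    have h2' := List.pairwise_cons.mp h2
    have hne : ∀ x ∈ b :: t2, ¬ x = a := by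
      intro x hx he
      subst he
      rcases List.mem_cons.mp hx with rfl | hx'
      · exact absurd hab (lt_irrefl _)
      · exact absurd (lt_trans hab (h2'.1 x hx')) (lt_irrefl _)
    have hna : a ∉ b :: t2 := fun h => hne a h rfl
    simp only [pvMerge, hlt, if_true]
    rw [ih h1'.2 h2]
    simp only [Prod.mk.injEq]
    refine ⟨?_, ?_, ?_⟩
    · conv_rhs => rw [List.filter_cons_of_pos (by simp [hna])]
    · refine List.filter_congr ?_
      intro x hx
      simp [hne x hx]
    · conv_rhs => rw [List.filter_cons_of_neg (by simp [hna])]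
  | case4 a t1 b t2 hnlt hlt ih =>
    intro h1 h2
    have hba : PvLt b a := show (toLex b : Lex (String × String)) < toLex a from
      of_decide_eq_true (pvTupleLt_eq_decide b a ▸ hlt)
    have h1' := List.pairwise_cons.mp h1
    have h2' := List.pairwise_cons.mp h2
    have hne : ∀ x ∈ a :: t1, ¬ x = b := by
      intro x hx he
      subst he
      rcases List.mem_cons.mp hx with rfl | hx'
      · exact absurd hba (lt_irrefl _)
      · exact absurd (lt_trans hba (h1'.1 x hx')) (lt_irrefl _)
    have hnb : b ∉ a :: t1 := fun h => hne b h rfl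
    have hf1 : pvTupleLt a b = false := by
      cases h : pvTupleLt a b
      · rfl
      · exact absurd h hnlt
    have hstep : pvMerge (a :: t1) (b :: t2) =
        ((pvMerge (a :: t1) t2).1, b :: (pvMerge (a :: t1) t2).2.1, (pvMerge (a :: t1) t2).2.2) := by
      simp [pvMerge, hf1, hlt]
    rw [hstep]
    simp only [ih h1 h2'.2, Prod.mk.injEq]
    refine ⟨?_, ?_, ?_⟩
    · refine List.filter_congr ?_
      intro x hx
      simp [hne x hx]
    · conv_rhs => rw [List.filter_cons_of_pos (by simp [hnb])]
    · refine List.filter_congr ?_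
      intro x hx
      simp [hne x hx]
  | case5 a t1 b t2 hnlt hnlt2 ih =>
    intro h1 h2
    have hn1 : ¬ (toLex a : Lex (String × String)) < toLex b := by
      intro h; exact hnlt (by rw [pvTupleLt_eq_decide]; exact decide_eq_true h)
    have hn2 : ¬ (toLex b : Lex (String × String)) < toLex a := by
      intro h; exact hnlt2 (by rw [pvTupleLt_eq_decide]; exact decide_eq_true h)
    have hab : a = b := toLex_inj.mp (le_antisymm (not_lt.mp hn2) (not_lt.mp hn1))
    subst hab
    have h1' := List.pairwise_cons.mp h1
    have h2' := List.pairwise_cons.mp h2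
    have hne1 : ∀ x ∈ t1, ¬ x = a := fun x hx he =>
      absurd (h1'.1 x hx) (he ▸ lt_irrefl _)
    have hne2 : ∀ x ∈ t2, ¬ x = a := fun x hx he =>
      absurd (h2'.1 x hx) (he ▸ lt_irrefl _)
    have hf1 : pvTupleLt a a = false := by
      cases h : pvTupleLt a a
      · rfl
      · exact absurd h hnlt
    have hstep : pvMerge (a :: t1) (a :: t2) =
        ((pvMerge t1 t2).1, (pvMerge t1 t2).2.1, a :: (pvMerge t1 t2).2.2) := by
      simp [pvMerge, hf1]
    rw [hstep]
    simp only [ih h1'.2 h2'.2, Prod.mk.injEq]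
    refine ⟨?_, ?_, ?_⟩
    · conv_rhs => rw [List.filter_cons_of_neg (by simp)]
      refine List.filter_congr ?_
      intro x hx
      simp [hne1 x hx]
    · conv_rhs => rw [List.filter_cons_of_neg (by simp)]
      refine List.filter_congr ?_
      intro x hx
      simp [hne2 x hx]
    · conv_rhs => rw [List.filter_cons_of_pos (by simp)]
      refine congrArg (List.cons a) ?_
      refine List.filter_congr ?_
      intro x hx
      simp [hne1 x hx]

theorem pairwise_sorted_dedup (l : List (String × String)) :
    (PySem.List.sorted (PySem.List.dedup l) (fun p => (toLex p : Lex (String × String)))).Pairwise PvLt := by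
  have hnd : (PySem.List.sorted (PySem.List.dedup l) (fun p => (toLex p : Lex (String × String)))).Nodup := by
    rw [(PySem.List.sorted_perm (PySem.List.dedup l) _ false).nodup_iff]
    rw [PySem.List.dedup_eq_ofList]
    exact PySem.Set.nodup_ofList l
  have hle := PySem.List.sorted_pairwise (PySem.List.dedup l) (fun p => (toLex p : Lex (String × String)))
  have := List.Pairwise.and hle hnd
  exact this.imp (fun {a b} h => lt_of_le_of_ne h.1 (by simpa [toLex_inj] using h.2))

-- a bucket: any strictly increasing list with the right membership IS A's sorted set-bucket
theorem bucket_eq (s ys : List (String × String)) (hs : s.Nodup) (hys : ys.Pairwise PvLt)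
    (hmem : ∀ x, x ∈ ys ↔ x ∈ s) :
    PySem.List.sorted s (fun p => (toLex p : Lex (String × String))) = ys := by
  refine PySem.List.sorted_eq_of_perm_of_pairwise_lt s ys _ ?_ (by exact hys)
  have hnd : ys.Nodup := hys.imp (fun {a b} h => by
    intro he; exact absurd h (by simp [PvLt, he]))
  exact (List.perm_ext_iff_of_nodup hnd hs).2 hmem

-- ===== VERDICT (by name: the statement is the Claim_ definition above) =====
theorem compare_tables_spec : Claim_equal_compare_tables := by
  intro db1 db2 _
  simp only [Spec_compare_tables, compare_tables, compare_tables_alt, sorted2_eq_sorted_lex]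
  rw [pvMerge_spec _ _ (pairwise_sorted_dedup _) (pairwise_sorted_dedup _)]
  simp only [List.cons.injEq, Prod.mk.injEq, and_true, true_and]
  refine ⟨?_, ?_, ?_⟩
  · refine bucket_eq _ _ ((PySem.Set.nodup_ofList _).filter _) ((pairwise_sorted_dedup _).filter _) ?_
    intro x
    simp [PySem.Set.diff, List.mem_filter, PySem.Set.mem_ofList]
  · refine bucket_eq _ _ ((PySem.Set.nodup_ofList _).filter _) ((pairwise_sorted_dedup _).filter _) ?_
    intro x
    simp [PySem.Set.diff, List.mem_filter, PySem.Set.mem_ofList]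
  · refine bucket_eq _ _ ((PySem.Set.nodup_ofList _).filter _) ((pairwise_sorted_dedup _).filter _) ?_
    intro x
    simp [PySem.Set.inter, List.mem_filter, PySem.Set.mem_ofList]
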